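-- pv_equiv track=rewrite | github.com/UltimateGregg/AboveBelow | scripts/blender_asset_audit.py | collect_name_hints
-- ===== SOURCE A (Python) =====
-- from typing import Any
--
-- def collect_name_hints(inspection: dict[str, Any], required_hints: list[str]) -> dict[str, list[str]]:
--     names = []
--     names.extend(str(name) for name in inspection.get("mesh_names", []))
--     names.extend(str(name) for name in inspection.get("empty_names", []))
--
--     found: dict[str, list[str]] = {}
--     for hint in required_hints:
--         matches = [name for name in names if hint in name.lower()]
--         if matches:
--             found[hint] = matches
--     return found
-- ===== SOURCE B (Python) =====
-- def collect_name_hints(inspection, required_hints):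
--     names = [str(n) for n in inspection.get("mesh_names", [])]
--     names += [str(n) for n in inspection.get("empty_names", [])]
--
--     buckets = {hint: [] for hint in required_hints}
--     for name in names:
--         low = name.lower()
--         for hint in buckets:
--             if hint in low:
--                 buckets[hint].append(name)
--     return {hint: matches for hint, matches in buckets.items() if matches}
-- ===== Notes on version B (the rewrite author's own statement) =====
-- stated objective: alternative
-- what changed: Inverts the loop nesting: pre-initializes one bucket per (implicitly deduplicated) hint, makes a single pass over the names computing name.lower() once per name and appending the name to every matching bucket, then drops empty buckets — instead of re-scanning and re-lowercasing the whole name list once per hint.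
import Mathlib
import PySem

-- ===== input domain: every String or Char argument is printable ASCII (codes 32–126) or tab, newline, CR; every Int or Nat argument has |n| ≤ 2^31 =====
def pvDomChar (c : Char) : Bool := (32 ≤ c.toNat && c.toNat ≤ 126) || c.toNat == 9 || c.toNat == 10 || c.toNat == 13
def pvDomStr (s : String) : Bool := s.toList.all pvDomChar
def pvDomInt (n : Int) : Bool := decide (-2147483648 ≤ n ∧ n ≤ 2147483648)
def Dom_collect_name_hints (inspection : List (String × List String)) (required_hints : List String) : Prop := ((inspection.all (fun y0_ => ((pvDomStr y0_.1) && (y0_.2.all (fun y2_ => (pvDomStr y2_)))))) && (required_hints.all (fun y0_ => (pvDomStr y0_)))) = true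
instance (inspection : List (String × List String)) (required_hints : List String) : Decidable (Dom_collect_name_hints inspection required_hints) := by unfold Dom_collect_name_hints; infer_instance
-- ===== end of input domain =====

-- B inverts A's loop nesting (one pass over the names into pre-initialized per-hint buckets,
-- lowercasing each name once, then dropping empty buckets); same return value, no speed claim.

-- ===== PORT A =====
def collect_name_hints (inspection : List (String × List String)) (required_hints : List String) : List (String × List String) :=
  -- str(name) is the identity on values that are already str, so the two extend lines append the lists unchanged
  let names : List String :=
    (PySem.Dict.getD ⟨inspection⟩ "mesh_names" []) ++ (PySem.Dict.getD ⟨inspection⟩ "empty_names" [])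
  (required_hints.foldl
    (fun (found : PySem.Dict String (List String)) hint =>
      let matches_ := names.filter (fun name => PySem.Str.isIn hint (PySem.Str.lower name))
      if matches_ ≠ [] then found.insert hint matches_ else found)
    PySem.Dict.empty).items

-- ===== PORT B =====
def collect_name_hints_alt (inspection : List (String × List String)) (required_hints : List String) : List (String × List String) :=
  let names : List String :=
    (PySem.Dict.getD ⟨inspection⟩ "mesh_names" []) ++ (PySem.Dict.getD ⟨inspection⟩ "empty_names" [])
  -- buckets = {hint: [] for hint in required_hints}
  let buckets0 : PySem.Dict String (List String) :=
    required_hints.foldl (fun d hint => d.insert hint []) PySem.Dict.empty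
  -- for name in names: low = name.lower(); for hint in buckets: if hint in low: buckets[hint].append(name)
  let buckets : PySem.Dict String (List String) :=
    names.foldl
      (fun d name =>
        let low := PySem.Str.lower name
        d.keys.foldl
          (fun d' hint => if PySem.Str.isIn hint low then d'.modify hint [] (fun m => m ++ [name]) else d')
          d)
      buckets0
  -- {hint: matches for hint, matches in buckets.items() if matches}
  (buckets.items.foldl
    (fun (r : PySem.Dict String (List String)) p => if p.2 ≠ [] then r.insert p.1 p.2 else r)
    PySem.Dict.empty).items

-- ===== PRECONDITION & SPEC =====
def Spec_collect_name_hints (inspection : List (String × List String)) (required_hints : List String) (out : List (String × List String)) : Prop := out = collect_name_hints_alt inspection required_hints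
instance (inspection : List (String × List String)) (required_hints : List String) (out : List (String × List String)) : Decidable (Spec_collect_name_hints inspection required_hints out) := by unfold Spec_collect_name_hints; infer_instance

-- ===== CLAIM (what is proved, stated in full; the proofs are below) =====
def Claim_equal_collect_name_hints : Prop := ∀ (inspection : List (String × List String)) (required_hints : List String), Dom_collect_name_hints inspection required_hints → Spec_collect_name_hints inspection required_hints (collect_name_hints inspection required_hints)

-- ===== LEMMAS AND PROOFS =====

lemma pv_filter_discard {l : List String} {x : String} {q : String → Bool} (hx : q x = false) :
    (PySem.Set.discard l x).filter q = l.filter q := by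
  unfold PySem.Set.discard
  rw [List.filter_filter]
  apply List.filter_congr
  intro y _
  by_cases hy : y = x
  · subst hy; simp [hx]
  · simp [hy]

lemma pv_foldl_insert_cond_items (pred : String → Prop) [DecidablePred pred]
    (val : String → List String) :
    ∀ (hints : List String) (d : PySem.Dict String (List String)),
      d.keys.Nodup → (∀ p ∈ d.items, p.2 = val p.1) →
      (hints.foldl (fun d h => if pred h then d.insert h (val h) else d) d).items
        = d.items ++ ((PySem.Set.ofList hints).filter
            (fun h => decide (pred h) && !(d.contains h))).map (fun h => (h, val h)) := by
  intro hints
  induction hints with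
  | nil => intro d _ _; simp [PySem.Set.ofList, PySem.Set.empty]
  | cons h t ih =>
    intro d hnd hv
    rw [List.foldl_cons, PySem.Set.ofList_cons]
    by_cases hp : pred h
    · by_cases hc : d.contains h = true
      · -- overwrite with the same value: items unchanged
        have hitems : (d.insert h (val h)).items = d.items := by
          rw [PySem.Dict.items_insert_of_contains d (val h) hc]
          conv_rhs => rw [← List.map_id d.items]
          apply List.map_congr_left
          intro p hp'
          by_cases hph : (p.1 == h) = true
          · have h1 : p.1 = h := eq_of_beq hph
            have h2 := hv p hp'
            simp [← h1, ← h2]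
          · simp [hph]
        have hkeys : (d.insert h (val h)).keys = d.keys := PySem.Dict.keys_insert_of_contains d (val h) hc
        rw [if_pos hp, ih _ (by rw [hkeys]; exact hnd) (by rw [hitems]; exact hv), hitems]
        congr 1
        rw [List.filter_cons]
        have hhead : (decide (pred h) && !d.contains h) = false := by simp [hc]
        rw [hhead]
        simp only [Bool.false_eq_true, if_false]
        rw [pv_filter_discard (by simp [hc])]
        apply congrArg
        apply List.filter_congr
        intro y _
        rw [PySem.Dict.contains_insert]
        by_cases hyh : y = h
        · subst hyh; simp [hc]
        · have hb : (y == h) = false := beq_eq_false_iff_ne.mpr hyh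
          rw [hb]; simp
      · -- fresh insert
        have hnm : h ∉ d.keys := fun hmem => hc ((PySem.Dict.contains_iff_mem_keys d h).mpr hmem)
        have hc' : d.contains h = false := by
          cases hcc : d.contains h
          · rfl
          · exact absurd hcc hc
        have hitems : (d.insert h (val h)).items = d.items ++ [(h, val h)] :=
          PySem.Dict.items_insert_of_not_contains d (val h) hc'
        have hkeys : (d.insert h (val h)).keys = d.keys ++ [h] :=
          PySem.Dict.keys_insert_of_not_contains d (val h) hc'
        have hnd' : (d.insert h (val h)).keys.Nodup := by
          rw [hkeys, List.nodup_append]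
          refine ⟨hnd, List.nodup_singleton h, ?_⟩
          intro a ha b hb
          simp only [List.mem_singleton] at hb
          subst hb
          intro hab
          exact hnm (hab ▸ ha)
        have hv' : ∀ p ∈ (d.insert h (val h)).items, p.2 = val p.1 := by
          intro p hp'
          rw [hitems] at hp'
          rcases List.mem_append.mp hp' with h1 | h1
          · exact hv p h1
          · simp at h1; subst h1; rfl
        rw [if_pos hp, ih _ hnd' hv', hitems]
        rw [List.filter_cons]
        have hhead : (decide (pred h) && !d.contains h) = true := by simp [hc', hp]
        rw [hhead]
        simp only [if_true, List.map_cons, List.append_assoc, List.cons_append, List.nil_append]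
        congr 2
        rw [← pv_filter_discard (l := PySem.Set.ofList t) (x := h)
              (q := fun y => decide (pred y) && !((d.insert h (val h)).contains y))
              (by simp)]
        apply congrArg
        apply List.filter_congr
        intro y hy
        have hyh : ¬ (y == h) = true := by
          unfold PySem.Set.discard at hy
          have := List.of_mem_filter hy
          simpa using this
        rw [PySem.Dict.contains_insert]
        have hb : (y == h) = false := by
          cases hbb : (y == h)
          · rfl
          · exact absurd hbb hyh
        rw [hb]; simp
    · rw [if_neg hp, ih _ hnd hv]
      congr 1
      rw [List.filter_cons]
      have hhead : (decide (pred h) && !d.contains h) = false := by simp [hp]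
      rw [hhead]
      simp only [Bool.false_eq_true, if_false]
      rw [pv_filter_discard (by simp [hp])]

lemma pv_inner (name : String) :
    ∀ (K : List String) (d : PySem.Dict String (List String)),
      K.Nodup → (∀ h ∈ K, d.contains h = true) →
      (K.foldl (fun d' hint => if PySem.Str.isIn hint (PySem.Str.lower name) = true then d'.modify hint [] (fun m => m ++ [name]) else d') d).keys = d.keys
      ∧ ∀ k, (K.foldl (fun d' hint => if PySem.Str.isIn hint (PySem.Str.lower name) = true then d'.modify hint [] (fun m => m ++ [name]) else d') d).getD k []
          = if k ∈ K ∧ PySem.Str.isIn k (PySem.Str.lower name) = true then d.getD k [] ++ [name] else d.getD k [] := by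
  intro K
  induction K with
  | nil =>
    intro d _ _
    refine ⟨rfl, fun k => ?_⟩
    simp
  | cons h t ih =>
    intro d hnd hsub
    have hch : d.contains h = true := hsub h (List.mem_cons_self ..)
    have hnt : h ∉ t := (List.nodup_cons.mp hnd).1
    have hndt : t.Nodup := (List.nodup_cons.mp hnd).2
    by_cases hm : PySem.Str.isIn h (PySem.Str.lower name) = true
    · set d1 := d.modify h [] (fun m => m ++ [name]) with hd1
      have hkeys : d1.keys = d.keys := by
        rw [hd1, PySem.Dict.keys_modify, PySem.Dict.keys_insert_of_contains _ _ hch]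
      have hcont : ∀ k, d1.contains k = d.contains k := by
        intro k
        rw [hd1, PySem.Dict.contains_modify]
        by_cases hk : k = h
        · subst hk; simp [hch]
        · have hb : (k == h) = false := beq_eq_false_iff_ne.mpr hk
          rw [hb]; simp
      have hget : ∀ k, d1.getD k [] = if k = h then d.getD k [] ++ [name] else d.getD k [] := by
        intro k
        rw [hd1, PySem.Dict.getD_modify]
        by_cases hk : k = h
        · subst hk; simp
        · simp [hk]
      have hsub1 : ∀ h' ∈ t, d1.contains h' = true := fun h' hh' => by
        rw [hcont]; exact hsub h' (List.mem_cons_of_mem _ hh')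
      obtain ⟨ihk, ihg⟩ := ih d1 hndt hsub1
      rw [List.foldl_cons, if_pos hm]
      refine ⟨by rw [ihk, hkeys], fun k => ?_⟩
      rw [ihg k, hget k]
      by_cases hk : k = h
      · subst hk
        rw [if_pos rfl, if_neg (fun hc => hnt hc.1),
            if_pos (And.intro (List.mem_cons_self ..) hm)]
      · rw [if_neg hk]
        by_cases hkt : k ∈ t ∧ PySem.Str.isIn k (PySem.Str.lower name) = true
        · rw [if_pos hkt, if_pos (And.intro (List.mem_cons_of_mem _ hkt.1) hkt.2)]
        · rw [if_neg hkt,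
              if_neg (fun hc => (List.mem_cons.mp hc.1).elim (fun h1 => hk h1) (fun h1 => hkt ⟨h1, hc.2⟩))]
    · rw [List.foldl_cons, if_neg hm]
      obtain ⟨ihk, ihg⟩ := ih d hndt (fun h' hh' => hsub h' (List.mem_cons_of_mem _ hh'))
      refine ⟨ihk, fun k => ?_⟩
      rw [ihg k]
      by_cases hk : k = h
      · subst hk
        rw [if_neg (fun hc => hnt hc.1), if_neg (fun hc => hm hc.2)]
      · by_cases hkt : k ∈ t ∧ PySem.Str.isIn k (PySem.Str.lower name) = true
        · rw [if_pos hkt, if_pos (And.intro (List.mem_cons_of_mem _ hkt.1) hkt.2)]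
        · rw [if_neg hkt,
              if_neg (fun hc => (List.mem_cons.mp hc.1).elim (fun h1 => hk h1) (fun h1 => hkt ⟨h1, hc.2⟩))]

lemma pv_outer :
    ∀ (names : List String) (d : PySem.Dict String (List String)), d.keys.Nodup →
      (names.foldl (fun d name => d.keys.foldl (fun d' hint => if PySem.Str.isIn hint (PySem.Str.lower name) = true then d'.modify hint [] (fun m => m ++ [name]) else d') d) d).keys = d.keys
      ∧ ∀ k ∈ d.keys, (names.foldl (fun d name => d.keys.foldl (fun d' hint => if PySem.Str.isIn hint (PySem.Str.lower name) = true then d'.modify hint [] (fun m => m ++ [name]) else d') d) d).getD k []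
          = d.getD k [] ++ names.filter (fun n => PySem.Str.isIn k (PySem.Str.lower n)) := by
  intro names
  induction names with
  | nil =>
    intro d _
    refine ⟨rfl, fun k _ => ?_⟩
    simp
  | cons n rest ih =>
    intro d hnd
    obtain ⟨hkeys1, hget1⟩ :=
      pv_inner n d.keys d hnd (fun h hh => (PySem.Dict.contains_iff_mem_keys d h).mpr hh)
    rw [List.foldl_cons]
    obtain ⟨ihk, ihg⟩ := ih _ (by rw [hkeys1]; exact hnd)
    refine ⟨by rw [ihk, hkeys1], fun k hk => ?_⟩
    rw [ihg k (by rw [hkeys1]; exact hk), hget1 k, List.filter_cons]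
    by_cases hm : PySem.Str.isIn k (PySem.Str.lower n) = true
    · rw [if_pos ⟨hk, hm⟩, hm]
      simp
    · rw [if_neg (fun hc => hm hc.2)]
      have : PySem.Str.isIn k (PySem.Str.lower n) = false := by
        cases hb : PySem.Str.isIn k (PySem.Str.lower n)
        · rfl
        · exact absurd hb hm
      rw [this]
      simp

lemma pv_pairs :
    ∀ (L : List (String × List String)) (d : PySem.Dict String (List String)),
      (∀ p ∈ L, d.contains p.1 = false) → (L.map Prod.fst).Nodup →
      (L.foldl (fun r p => if p.2 ≠ [] then r.insert p.1 p.2 else r) d).items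
        = d.items ++ L.filter (fun p => decide (p.2 ≠ [])) := by
  intro L
  induction L with
  | nil => intro d _ _; simp
  | cons p t ih =>
    intro d hfresh hnd
    rw [List.foldl_cons, List.filter_cons]
    have hpf : d.contains p.1 = false := hfresh p (List.mem_cons_self ..)
    have hnd' : (t.map Prod.fst).Nodup := (List.nodup_cons.mp (by simpa using hnd)).2
    have hpt : p.1 ∉ t.map Prod.fst := (List.nodup_cons.mp (by simpa using hnd)).1
    by_cases hne : p.2 ≠ []
    · rw [if_pos hne]
      have hfresh' : ∀ q ∈ t, (d.insert p.1 p.2).contains q.1 = false := by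
        intro q hq
        rw [PySem.Dict.contains_insert]
        have hb : (q.1 == p.1) = false := by
          apply beq_eq_false_iff_ne.mpr
          intro he
          exact hpt (he ▸ List.mem_map_of_mem hq)
        rw [hb, hfresh q (List.mem_cons_of_mem _ hq)]
        rfl
      rw [ih _ hfresh' hnd', PySem.Dict.items_insert_of_not_contains d p.2 hpf]
      have : decide (p.2 ≠ []) = true := by simp [hne]
      rw [this]
      simp
    · rw [if_neg hne, ih _ (fun q hq => hfresh q (List.mem_cons_of_mem _ hq)) hnd']
      have : decide (p.2 ≠ []) = false := by simpa using hne
      rw [this]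
      simp

-- ===== VERDICT (by name: the statement is the Claim_ definition above) =====
theorem collect_name_hints_spec : Claim_equal_collect_name_hints := by
  intro inspection hints _
  unfold Spec_collect_name_hints
  unfold collect_name_hints collect_name_hints_alt
  set names : List String :=
    (PySem.Dict.getD ⟨inspection⟩ "mesh_names" []) ++ (PySem.Dict.getD ⟨inspection⟩ "empty_names" []) with hnames
  set ms : String → List String := fun h => names.filter (fun name => PySem.Str.isIn h (PySem.Str.lower name)) with hms
  -- A side
  have hA := pv_foldl_insert_cond_items (pred := fun h => ms h ≠ []) (val := ms) hints PySem.Dict.empty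
    (by rw [PySem.Dict.keys_empty]; exact List.nodup_nil)
    (by intro p hp; exact absurd hp (List.not_mem_nil))
  simp only [hms] at hA
  rw [hA]
  have hAcan : (PySem.Dict.empty : PySem.Dict String (List String)).items ++
      ((PySem.Set.ofList hints).filter
        (fun h => decide (names.filter (fun name => PySem.Str.isIn h (PySem.Str.lower name)) ≠ []) && !(PySem.Dict.empty : PySem.Dict String (List String)).contains h)).map
        (fun h => (h, names.filter (fun name => PySem.Str.isIn h (PySem.Str.lower name))))
      = ((PySem.Set.ofList hints).filter (fun h => decide (ms h ≠ []))).map (fun h => (h, ms h)) := by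
    simp only [hms, PySem.Dict.contains_empty, Bool.not_false, Bool.and_true]
    rfl
  rw [hAcan]
  -- B side: buckets0
  have hfun : (fun (d : PySem.Dict String (List String)) (h : String) => d.insert h ([] : List String))
      = (fun (d : PySem.Dict String (List String)) (h : String) => if True then d.insert h [] else d) := by
    funext d h
    rw [if_pos trivial]
  rw [hfun]
  have hB0 := pv_foldl_insert_cond_items (pred := fun _ => True) (val := fun _ => []) hints PySem.Dict.empty
    (by rw [PySem.Dict.keys_empty]; exact List.nodup_nil)
    (by intro p hp; exact absurd hp (List.not_mem_nil))
  set buckets0 : PySem.Dict String (List String) :=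
    hints.foldl (fun d h => if True then d.insert h [] else d) PySem.Dict.empty with hb0
  have hitems0 : buckets0.items = (PySem.Set.ofList hints).map (fun h => (h, ([] : List String))) := by
    rw [hb0, hB0]
    simp [PySem.Dict.empty]
  have hid : ∀ (f : String → List String) (l : List String),
      List.map (Prod.fst ∘ fun k => (k, f k)) l = l := by
    intro f l
    induction l with
    | nil => rfl
    | cons x t ihh => simp only [List.map_cons, ihh, Function.comp_apply]
  have hkeys0 : buckets0.keys = PySem.Set.ofList hints := by
    show buckets0.items.map Prod.fst = _
    rw [hitems0, List.map_map, hid]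
  have hnd0 : buckets0.keys.Nodup := by
    rw [hkeys0]; exact PySem.Set.nodup_ofList hints
  have hgd0 : ∀ k, buckets0.getD k [] = [] := by
    intro k
    cases hc : buckets0.contains k
    · exact PySem.Dict.getD_of_not_contains buckets0 [] hc
    · have hk : k ∈ buckets0.keys := (PySem.Dict.contains_iff_mem_keys buckets0 k).mp hc
      rw [hkeys0] at hk
      have hmem : (k, ([] : List String)) ∈ buckets0.items := by
        rw [hitems0]
        exact List.mem_map_of_mem hk
      exact PySem.Dict.getD_of_mem_items buckets0 hmem hnd0 []
  -- B side: the name loop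
  obtain ⟨hbk, hbg⟩ := pv_outer names buckets0 hnd0
  set buckets : PySem.Dict String (List String) :=
    names.foldl (fun d name => d.keys.foldl (fun d' hint => if PySem.Str.isIn hint (PySem.Str.lower name) = true then d'.modify hint [] (fun m => m ++ [name]) else d') d) buckets0 with hb
  have hbkeys : buckets.keys = PySem.Set.ofList hints := by rw [hb, hbk, hkeys0]
  have hbnd : buckets.keys.Nodup := by rw [hbkeys]; exact PySem.Set.nodup_ofList hints
  have hbitems : buckets.items = (PySem.Set.ofList hints).map (fun k => (k, ms k)) := by
    rw [PySem.Dict.items_eq_map_keys buckets hbnd [], hbkeys]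
    apply List.map_congr_left
    intro k hk
    have hk0 : k ∈ buckets0.keys := by rw [hkeys0]; exact hk
    rw [hb, hbg k hk0, hgd0 k, List.nil_append, hms]
  -- B side: final comprehension
  have hfresh : ∀ p ∈ buckets.items, (PySem.Dict.empty : PySem.Dict String (List String)).contains p.1 = false :=
    fun p _ => PySem.Dict.contains_empty p.1
  have hfnd : (buckets.items.map Prod.fst).Nodup := by
    rw [hbitems, List.map_map, hid]
    exact PySem.Set.nodup_ofList hints
  rw [pv_pairs buckets.items PySem.Dict.empty hfresh hfnd, hbitems, List.filter_map]
  simp only [Function.comp_def]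
  rfl
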